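-- pv_equiv track=rewrite | github.com/austral-prog/tp-7-valentinaotero | loops_and_print.py | enumerate_backwards
-- ===== SOURCE A (Python) =====
-- def enumerate_backwards(list):
--     result = []
--     index = 0
--     for string in list:
--         if string:
--             new_element = f"{index}. {string[ : :-1]}"
--             result.append (new_element)
--             index +=1
--     return result
-- ===== SOURCE B (Python) =====
-- def enumerate_backwards(list):
--     # Back-to-front construction: walk the list from the right with a countdown
--     # index starting at the number of kept strings, then reverse the result.
--     idx = sum(1 for s in list if s)
--     result = []
--     for s in reversed(list):
--         if s:
--             idx -= 1
--             result.append(f"{idx}. {s[::-1]}")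
--     result.reverse()
--     return result
-- ===== Notes on version B (the rewrite author's own statement) =====
-- stated objective: alternative
-- what changed: Builds the output back-to-front: counts the kept strings first, then traverses the list in reverse with a decrementing index and reverses the collected result, instead of A's single forward pass with an incrementing counter.
import Mathlib
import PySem

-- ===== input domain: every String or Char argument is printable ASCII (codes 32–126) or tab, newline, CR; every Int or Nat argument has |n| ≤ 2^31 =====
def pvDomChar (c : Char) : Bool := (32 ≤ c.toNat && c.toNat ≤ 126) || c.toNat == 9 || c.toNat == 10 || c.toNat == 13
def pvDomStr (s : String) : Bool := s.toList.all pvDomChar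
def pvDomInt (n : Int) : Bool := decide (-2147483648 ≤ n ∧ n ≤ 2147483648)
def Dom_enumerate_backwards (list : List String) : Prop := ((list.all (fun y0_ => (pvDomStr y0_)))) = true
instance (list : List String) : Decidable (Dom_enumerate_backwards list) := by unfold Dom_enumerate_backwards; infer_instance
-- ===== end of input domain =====

-- B builds the output back-to-front: it counts the kept strings, then walks the list
-- in reverse with a decrementing index and reverses the result (alternative; same O(n)).


-- shared formatting helper: f"{i}. {s[::-1]}"; s[::-1] is reversal; built over List Char
def pvFmt (i : Int) (s : String) : String :=
  String.ofList ((PySem.Int.toStr i).toList ++ ". ".toList ++ s.toList.reverse)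

-- ===== PORT A =====
-- A: one forward loop threading (result, index); append when the string is truthy (non-empty)
def enumerate_backwards (list : List String) : List String :=
  (list.foldl
    (fun (st : List String × Int) string =>
      if string ≠ "" then (st.1 ++ [pvFmt st.2 string], st.2 + 1) else st)
    ([], 0)).1

-- ===== PORT B =====
-- B: idx = count of kept; loop over reversed(list) decrementing idx, appending; reverse result
def enumerate_backwards_alt (list : List String) : List String :=
  let idx0 : Int := ((list.filter (fun s => s ≠ "")).length : Int)
  let st := list.reverse.foldl
    (fun (st : List String × Int) s =>
      if s ≠ "" then (st.1 ++ [pvFmt (st.2 - 1) s], st.2 - 1) else st)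
    ([], idx0)
  st.1.reverse

-- ===== PRECONDITION & SPEC =====
def Spec_enumerate_backwards (list : List String) (out : List String) : Prop := out = enumerate_backwards_alt list
instance (list : List String) (out : List String) : Decidable (Spec_enumerate_backwards list out) := by unfold Spec_enumerate_backwards; infer_instance

-- ===== CLAIM =====
def Claim_equal_enumerate_backwards : Prop := ∀ (list : List String), Dom_enumerate_backwards list → Spec_enumerate_backwards list (enumerate_backwards list)

-- ===== LEMMAS AND PROOFS =====
-- A's forward loop yields acc ++ formatted enumerate of the kept strings
theorem eb_loopA (l : List String) (acc : List String) (i : Int) :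
    (l.foldl
      (fun (st : List String × Int) string =>
        if string ≠ "" then (st.1 ++ [pvFmt st.2 string], st.2 + 1) else st)
      (acc, i)).1
    = acc ++ (PySem.List.enumerate (l.filter (fun s => s ≠ "")) i).map
        (fun p => pvFmt p.1 p.2) := by
  induction l generalizing acc i with
  | nil => simp [PySem.List.enumerate_nil]
  | cons s rest ih =>
    by_cases h : s = ""
    · simpa [List.foldl, h] using ih acc i
    · simpa [List.foldl, h, PySem.List.enumerate_cons] using ih (acc ++ [pvFmt i s]) (i + 1)

-- B's countdown loop over m yields acc ++ reversed formatted enumerate of m's kept strings,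
-- starting from i minus the number of kept strings in m
theorem eb_loopB (m : List String) (acc : List String) (i : Int) :
    (m.foldl
      (fun (st : List String × Int) s =>
        if s ≠ "" then (st.1 ++ [pvFmt (st.2 - 1) s], st.2 - 1) else st)
      (acc, i)).1
    = acc ++ ((PySem.List.enumerate ((m.filter (fun s => s ≠ "")).reverse)
        (i - ((m.filter (fun s => s ≠ "")).length : Int))).map
        (fun p => pvFmt p.1 p.2)).reverse := by
  induction m generalizing acc i with
  | nil => simp [PySem.List.enumerate_nil]
  | cons s rest ih =>
    by_cases h : s = ""
    · simpa [List.foldl, h] using ih acc i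
    · have h2 : ¬ s = "" := h
      have := ih (acc ++ [pvFmt (i - 1) s]) (i - 1)
      simp only [List.foldl, h2, ite_not, List.filter_cons, ne_eq, decide_not,
        Bool.not_eq_true', decide_eq_false_iff_not, not_false_iff, if_true] at this ⊢
      rw [this, List.reverse_cons, PySem.List.enumerate_append, List.map_append,
        List.reverse_append, PySem.List.enumerate_cons, PySem.List.enumerate_nil]
      have hidx : i - (((s :: List.filter (fun s => !decide (s = "")) rest).length : Nat) : Int)
          = i - 1 - ((List.filter (fun s => !decide (s = "")) rest).length : Int) := by
        simp only [List.length_cons]; push_cast; ring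
      have hidx2 : i - 1 - ((List.filter (fun s => !decide (s = "")) rest).length : Int)
          + (((List.filter (fun s => !decide (s = "")) rest).reverse.length : Nat) : Int) = i - 1 := by
        simp only [List.length_reverse]; ring
      rw [hidx, hidx2]
      simp [List.append_assoc]

-- ===== VERDICT =====
theorem enumerate_backwards_spec : Claim_equal_enumerate_backwards := by
  intro l _
  show enumerate_backwards l = enumerate_backwards_alt l
  rw [enumerate_backwards, enumerate_backwards_alt, eb_loopA, eb_loopB]
  simp [List.filter_reverse]
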